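-- pv_equiv track=rewrite | github.com/BuyankinM/Numeric_Matrix_Processor | Problems/Last index of max/task.py | last_indexof_max
-- ===== SOURCE A (Python) =====
-- def last_indexof_max(numbers):
--     if not numbers:
--         return -1
--     ind = 0
--
--     for i, num in enumerate(numbers[1:], 1):
--         if num >= numbers[ind]:
--             ind = i
--
--     return ind
-- ===== SOURCE B (Python) =====
-- def last_indexof_max(numbers):
--     if not numbers:
--         return -1
--     m = max(numbers)
--     return len(numbers) - 1 - numbers[::-1].index(m)
-- ===== Notes on version B (the rewrite author's own statement) =====
-- stated objective: idiomatic
-- what changed: Replaces the running-index scan with '>=' updates by a max() reduction followed by a reverse .index lookup, computing the last occurrence of the maximum arithmetically.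
import Mathlib
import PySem

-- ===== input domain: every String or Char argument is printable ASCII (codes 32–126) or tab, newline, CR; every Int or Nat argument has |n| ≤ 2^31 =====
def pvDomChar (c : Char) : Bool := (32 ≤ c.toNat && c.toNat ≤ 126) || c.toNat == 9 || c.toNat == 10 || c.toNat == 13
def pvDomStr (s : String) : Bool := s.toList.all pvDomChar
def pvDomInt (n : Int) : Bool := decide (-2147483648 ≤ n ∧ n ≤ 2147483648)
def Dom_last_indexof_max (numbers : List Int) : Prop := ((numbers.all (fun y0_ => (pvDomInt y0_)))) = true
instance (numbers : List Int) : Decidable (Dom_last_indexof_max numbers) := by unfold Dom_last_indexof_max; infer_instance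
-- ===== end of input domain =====

-- B replaces A's running-index scan by a max() reduction plus a reverse .index lookup (idiomatic; same last-tie behaviour).

-- ===== PORT A =====
-- Port of A: loop over enumerate(numbers[1:], 1), state ind; numbers[ind] via pyGetD
-- (ind is always a valid index, so the default is never read).
def last_indexof_max (numbers : List Int) : Int :=
  if numbers = [] then -1
  else
    (PySem.List.enumerate (PySem.List.slice numbers (some 1) none) 1).foldl
      (fun ind p => if PySem.List.pyGetD numbers ind 0 ≤ p.2 then p.1 else ind) 0

-- ===== PORT B =====
-- Port of B: m = max(numbers); len - 1 - numbers[::-1].index(m).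
-- max(numbers) on a nonempty list is PySem.List.max? (getD never read);
-- .index always finds m, so index?'s default is never read either.
def last_indexof_max_alt (numbers : List Int) : Int :=
  if numbers = [] then -1
  else
    let m := (PySem.List.max? numbers (fun y => y)).getD 0
    let rev := (PySem.List.slice? numbers none none (-1)).getD []
    (numbers.length : Int) - 1 - ((PySem.List.index? rev m).getD 0 : Nat)

-- ===== PRECONDITION & SPEC =====
def Spec_last_indexof_max (numbers : List Int) (out : Int) : Prop := out = last_indexof_max_alt numbers
instance (numbers : List Int) (out : Int) : Decidable (Spec_last_indexof_max numbers out) := by unfold Spec_last_indexof_max; infer_instance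

-- ===== CLAIM (what is proved, stated in full; the proofs are below) =====
def Claim_equal_last_indexof_max : Prop := ∀ (numbers : List Int), Dom_last_indexof_max numbers → Spec_last_indexof_max numbers (last_indexof_max numbers)

-- ===== LEMMAS AND PROOFS =====

-- A's loop state: invariant over the processed prefix x :: t, stated for any ambient
-- list nums that agrees with x :: t on indices 0..t.length (so it survives appends).
lemma pv_agree_prefix (x y : Int) (t : List Int) (k : Nat) (hk : k ≤ t.length) :
    PySem.List.pyGetD (x :: (t ++ [y])) (k : Int) 0 = PySem.List.pyGetD (x :: t) (k : Int) 0 := by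
  simp only [PySem.List.pyGetD_natCast, List.getD_eq_getElem?_getD]
  rw [show x :: (t ++ [y]) = (x :: t) ++ [y] from rfl,
      List.getElem?_append_left (by simp; omega)]

lemma pv_aux (x : Int) (t : List Int) (nums : List Int)
    (hag : ∀ k : Nat, k ≤ t.length → PySem.List.pyGetD nums (k : Int) 0 = PySem.List.pyGetD (x :: t) (k : Int) 0) :
    ∃ k : Nat, k ≤ t.length ∧
      (PySem.List.enumerate t 1).foldl
        (fun ind p => if PySem.List.pyGetD nums ind 0 ≤ p.2 then p.1 else ind) 0 = (k : Int) ∧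
      PySem.List.pyGetD (x :: t) (k : Int) 0 = t.foldl max x ∧
      PySem.List.index? (x :: t).reverse (t.foldl max x) = some (t.length - k) := by
  induction t using List.reverseRecOn generalizing nums with
  | nil =>
      refine ⟨0, by simp, by simp [PySem.List.enumerate], by simp [PySem.List.pyGetD_zero_cons], ?_⟩
      rw [show (x :: ([] : List Int)).reverse = [x] from rfl]
      exact PySem.List.index?_cons_self x []
  | append_singleton t y IH =>
      obtain ⟨k, hk, hfold, hval, hidx⟩ := IH nums (fun k hkle => by
        rw [hag k (le_trans hkle (by simp)), pv_agree_prefix x y t k hkle])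
      have hmax : (t ++ [y]).foldl max x = max (t.foldl max x) y := by
        simp [List.foldl_append]
      have hstep : (PySem.List.enumerate (t ++ [y]) 1).foldl
          (fun ind p => if PySem.List.pyGetD nums ind 0 ≤ p.2 then p.1 else ind) 0
          = (if PySem.List.pyGetD nums (k : Int) 0 ≤ y then ((1 : Int) + t.length) else (k : Int)) := by
        rw [PySem.List.enumerate_append, List.foldl_append, hfold]
        simp
      have hnk : PySem.List.pyGetD nums (k : Int) 0 = t.foldl max x := by
        rw [hag k (le_trans hk (by simp)), pv_agree_prefix x y t k hk, hval]
      have hrev : (x :: (t ++ [y])).reverse = y :: (x :: t).reverse := by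
        simp
      by_cases hy : t.foldl max x ≤ y
      · -- new element is a (weak) new max: index jumps to the end
        refine ⟨t.length + 1, by simp, ?_, ?_, ?_⟩
        · rw [hstep, hnk]; simp [hy]; ring
        · rw [hmax, max_eq_right hy]
          have h1 : PySem.List.pyGetD (x :: (t ++ [y])) ((t.length + 1 : Nat) : Int) 0
              = (x :: (t ++ [y])).getD (t.length + 1) 0 := by
            simpa using PySem.List.pyGetD_natCast (x :: (t ++ [y])) (t.length + 1) 0
          push_cast at h1 ⊢
          rw [h1, List.getD_eq_getElem?_getD,
              show x :: (t ++ [y]) = (x :: t) ++ [y] from rfl,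
              show t.length + 1 = (x :: t).length from by simp,
              List.getElem?_append_right (le_refl _)]
          simp
        · rw [hrev, hmax, max_eq_right hy]
          rw [show ((t ++ [y]).length - (t.length + 1)) = 0 from by simp]
          exact PySem.List.index?_cons_self y (x :: t).reverse
      · -- new element is smaller: state unchanged, max unchanged, reverse index shifts by one
        rw [not_le] at hy
        refine ⟨k, by simp; omega, ?_, ?_, ?_⟩
        · rw [hstep, hnk]; simp [not_le.mpr hy]
        · rw [hmax, max_eq_left (le_of_lt hy), pv_agree_prefix x y t k hk, hval]
        · rw [hrev, hmax, max_eq_left (le_of_lt hy)]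
          have hne : y ≠ t.foldl max x := by omega
          rw [PySem.List.index?_cons_of_ne _ hne, hidx]
          simp
          omega

-- ===== VERDICT (by name: the statement is the Claim_ definition above) =====
theorem last_indexof_max_spec : Claim_equal_last_indexof_max := by
  intro numbers _
  unfold Spec_last_indexof_max last_indexof_max last_indexof_max_alt
  cases numbers with
  | nil => simp
  | cons x t =>
      simp only [if_neg (List.cons_ne_nil x t)]
      obtain ⟨k, hk, hfold, _, hidx⟩ := pv_aux x t (x :: t) (fun _ _ => rfl)
      rw [PySem.List.slice_from_one]
      simp only [List.tail_cons]
      rw [hfold]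
      rw [PySem.List.slice?_none_none_neg_one]
      rw [PySem.List.max?_id_cons]
      simp only [Option.getD_some, hidx]
      simp
      push_cast [Nat.cast_sub hk]
      ring
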